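-- pv_equiv track=rewrite | github.com/IPRoyal/python-web-scraping-step-by-step-guide | scraper.py | count_languages
-- ===== SOURCE A (Python) =====
-- from typing import Dict, List, Optional
--
-- def count_languages(titles: List[str], languages: List[str]) -> Dict[str, int]:
--     counts = {lang: 0 for lang in languages}
--     for title in titles:
--         words = [w.strip(".,:;!?()[]{}'\"").lower() for w in title.split()]
--         for w in words:
--             if w in counts:
--                 counts[w] += 1
--     return counts
-- ===== SOURCE B (Python) =====
-- def count_languages(titles, languages):
--     # Tally EVERY normalized token in one flattened pass, then extract the
--     # requested languages in a separate comprehension.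
--     tally = {}
--     for w in (w.strip(".,:;!?()[]{}'\"").lower() for title in titles for w in title.split()):
--         tally[w] = tally.get(w, 0) + 1
--     return {lang: tally.get(lang, 0) for lang in languages}
-- ===== Notes on version B (the rewrite author's own statement) =====
-- stated objective: alternative
-- what changed: B tallies all normalized tokens of all titles unconditionally in one flattened pass into a dict (no membership filter while counting) and then builds the result in a separate pass over the languages list, instead of A's pre-initialized dict updated per-title behind an 'if w in counts' guard.
import Mathlib
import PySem

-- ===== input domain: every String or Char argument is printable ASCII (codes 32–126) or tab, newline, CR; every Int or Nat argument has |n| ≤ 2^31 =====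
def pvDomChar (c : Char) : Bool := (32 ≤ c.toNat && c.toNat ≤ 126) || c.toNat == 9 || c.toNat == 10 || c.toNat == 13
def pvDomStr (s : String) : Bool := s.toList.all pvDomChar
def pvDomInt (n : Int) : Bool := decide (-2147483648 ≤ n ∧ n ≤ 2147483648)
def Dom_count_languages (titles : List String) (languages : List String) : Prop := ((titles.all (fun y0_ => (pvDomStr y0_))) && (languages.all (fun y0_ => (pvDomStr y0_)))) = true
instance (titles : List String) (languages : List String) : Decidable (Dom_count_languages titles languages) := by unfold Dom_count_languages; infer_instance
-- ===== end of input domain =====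

-- B counts every normalized token of every title unconditionally into one tally,
-- then extracts the languages in a separate pass; A filters while counting into a
-- pre-initialized dict. Same cost, different decomposition (objective: alternative).

-- ===== PORT A =====
-- w.strip(".,:;!?()[]{}'\"").lower()
def pvNorm (w : String) : String :=
  PySem.Str.lower (PySem.Str.stripChars w ".,:;!?()[]{}'\"")

def count_languages (titles : List String) (languages : List String) : List (String × Int) :=
  let counts0 : PySem.Dict String Int :=
    languages.foldl (fun d lang => d.insert lang 0) PySem.Dict.empty
  let counts :=
    titles.foldl (fun d title =>
      (((PySem.Str.split₀ title)).map pvNorm).foldl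
        (fun d w => if d.contains w then d.insert w (d.getD w 0 + 1) else d) d) counts0
  counts.items

-- ===== PORT B =====
def count_languages_alt (titles : List String) (languages : List String) : List (String × Int) :=
  let tally : PySem.Dict String Int :=
    (titles.flatMap (fun title => (PySem.Str.split₀ title).map pvNorm)).foldl
      (fun d w => d.insert w (d.getD w 0 + 1)) PySem.Dict.empty
  (languages.foldl (fun d lang => d.insert lang (tally.getD lang 0)) PySem.Dict.empty).items

-- ===== PRECONDITION & SPEC =====
def Spec_count_languages (titles : List String) (languages : List String) (out : List (String × Int)) : Prop := out = count_languages_alt titles languages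
instance (titles : List String) (languages : List String) (out : List (String × Int)) : Decidable (Spec_count_languages titles languages out) := by unfold Spec_count_languages; infer_instance

-- ===== CLAIM (what is proved, stated in full; the proofs are below) =====
def Claim_equal_count_languages : Prop := ∀ (titles : List String) (languages : List String), Dom_count_languages titles languages → Spec_count_languages titles languages (count_languages titles languages)

-- ===== LEMMAS AND PROOFS =====

-- a 'for t in titles: for w in g(t): step' double loop is the single loop over the flattened list
theorem pv_foldl_foldl_flatMap {α β γ : Type} (f : γ → β → γ) (g : α → List β)
    (l : List α) (d : γ) :
    l.foldl (fun d t => (g t).foldl f d) d = (l.flatMap g).foldl f d := by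
  induction l generalizing d with
  | nil => rfl
  | cons t ts ih => simp [List.flatMap_cons, List.foldl_append, ih]

-- A's guarded counting loop keeps the key set unchanged
theorem pv_step_keys (tokens : List String) (d : PySem.Dict String Int) :
    (tokens.foldl (fun d w => if d.contains w then d.insert w (d.getD w 0 + 1) else d) d).keys
      = d.keys := by
  induction tokens generalizing d with
  | nil => rfl
  | cons w ts ih =>
    simp only [List.foldl_cons]
    by_cases h : d.contains w = true
    · rw [if_pos h, ih, PySem.Dict.keys_insert_of_contains (h := h)]
    · rw [if_neg h, ih]

-- value of A's guarded counting loop at any key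
theorem pv_step_getD (tokens : List String) (d : PySem.Dict String Int) (k : String) :
    (tokens.foldl (fun d w => if d.contains w then d.insert w (d.getD w 0 + 1) else d) d).getD k 0
      = d.getD k 0 + (if d.contains k then (tokens.count k : Int) else 0) := by
  induction tokens generalizing d with
  | nil => simp
  | cons w ts ih =>
    simp only [List.foldl_cons]
    by_cases hw : d.contains w = true
    · rw [if_pos hw, ih]
      have hc : (d.insert w (d.getD w 0 + 1)).contains k = d.contains k := by
        rw [PySem.Dict.contains_insert]
        by_cases hkw : k = w
        · subst hkw; simp [hw]
        · simp [hkw]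
      rw [hc, PySem.Dict.getD_insert]
      by_cases hkw : k = w
      · subst hkw
        simp only [hw, if_true, List.count_cons_self]
        push_cast; ring
      · rw [if_neg hkw, List.count_cons_of_ne (by simp; exact fun h => hkw h.symm)]
    · rw [if_neg hw, ih]
      by_cases hkw : k = w
      · subst hkw; simp [hw]
      · rw [List.count_cons_of_ne (by simp; exact fun h => hkw h.symm)]

-- a dict-comprehension loop {k: v(k) for k in ls} read at a key
theorem pv_build_getD (ls : List String) (v : String → Int) (d : PySem.Dict String Int) (k : String) :
    (ls.foldl (fun d l => d.insert l (v l)) d).getD k 0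
      = if k ∈ ls then v k else d.getD k 0 := by
  induction ls generalizing d with
  | nil => simp
  | cons a as ih =>
    simp only [List.foldl_cons]
    rw [ih]
    by_cases has : k ∈ as
    · simp [has]
    · rw [if_neg has, PySem.Dict.getD_insert]
      by_cases hka : k = a
      · subst hka; simp
      · simp [hka, has]

-- the unguarded tally loop is token counting
theorem pv_tally_getD (tokens : List String) (k : String) :
    (tokens.foldl (fun d w => d.insert w (d.getD w 0 + 1))
        (PySem.Dict.empty : PySem.Dict String Int)).getD k 0 = (tokens.count k : Int) := by
  rw [PySem.Dict.getD_foldl_insert_add_one]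
  simp

theorem count_languages_eq (titles : List String) (languages : List String) :
    count_languages titles languages = count_languages_alt titles languages := by
  unfold count_languages count_languages_alt
  set toks := titles.flatMap (fun title => (PySem.Str.split₀ title).map pvNorm) with htoks
  set c0 : PySem.Dict String Int :=
    languages.foldl (fun d lang => d.insert lang 0) PySem.Dict.empty with hc0
  set tally : PySem.Dict String Int :=
    toks.foldl (fun d w => d.insert w (d.getD w 0 + 1)) PySem.Dict.empty with htally
  set dA : PySem.Dict String Int :=
    titles.foldl (fun d title =>
      (((PySem.Str.split₀ title)).map pvNorm).foldl
        (fun d w => if d.contains w then d.insert w (d.getD w 0 + 1) else d) d) c0 with hdA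
  set dB : PySem.Dict String Int :=
    languages.foldl (fun d lang => d.insert lang (tally.getD lang 0)) PySem.Dict.empty with hdB
  have hdA' : dA = toks.foldl
      (fun d w => if d.contains w then d.insert w (d.getD w 0 + 1) else d) c0 := by
    rw [hdA, pv_foldl_foldl_flatMap]
  -- key sets
  have hkeys0 : c0.keys = PySem.Set.ofList languages := by
    rw [hc0, PySem.Dict.keys_foldl_insert]
    simp [PySem.Set.update_nil_left]
  have hkeysA : dA.keys = PySem.Set.ofList languages := by
    rw [hdA', pv_step_keys, hkeys0]
  have hkeysB : dB.keys = PySem.Set.ofList languages := by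
    rw [hdB, PySem.Dict.keys_foldl_insert]
    simp [PySem.Set.update_nil_left]
  have hndA : dA.keys.Nodup := by rw [hkeysA]; exact PySem.Set.nodup_ofList _
  have hndB : dB.keys.Nodup := by rw [hkeysB]; exact PySem.Set.nodup_ofList _
  -- pointwise values on the (shared) key list
  have hval : ∀ k ∈ PySem.Set.ofList languages, dA.getD k 0 = dB.getD k 0 := by
    intro k hk
    have hkl : k ∈ languages := (PySem.Set.mem_ofList _ _).mp hk
    have hcont : c0.contains k = true := by
      rw [PySem.Dict.contains_iff_mem_keys, hkeys0]; exact hk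
    have h0 : c0.getD k 0 = 0 := by
      rw [hc0, pv_build_getD]; simp [hkl]
    rw [hdA', pv_step_getD, hcont, if_pos rfl, h0, zero_add]
    rw [hdB, pv_build_getD, if_pos hkl, pv_tally_getD]
  rw [PySem.Dict.items_eq_map_keys dA hndA 0, PySem.Dict.items_eq_map_keys dB hndB 0,
    hkeysA, hkeysB]
  exact List.map_congr_left (fun k hk => by rw [hval k hk])

-- ===== VERDICT (by name: the statement is the Claim_ definition above) =====
theorem count_languages_spec : Claim_equal_count_languages := by
  intro titles languages _
  unfold Spec_count_languages
  exact count_languages_eq titles languages
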